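-- pv_equiv track=rewrite | github.com/sHorst/Oracle_Save_Viewer | main.py | find_unknown_addresses
-- ===== SOURCE A (Python) =====
-- SAVE_LENGTH = 0x550
--
-- DATATYPE_INVALID = -1
--
-- DATATYPE_WORD = 1
--
-- DATATYPE_WORD_BCD = 3
--
-- DATATYPE_STRING = 4
--
-- DATATYPE_BYTE_ARRAY = 7
--
-- GAMETYPE_AGES = 1,
--
-- def find_unknown_addresses(items, game_type=GAMETYPE_AGES):
--     known_adresses = {}
--
--     for x in items:
--         addr = x.get('addr', x.get('agesaddr' if game_type == GAMETYPE_AGES else 'ssnsaddr', 0x00))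
--
--         width = 1
--         if x.get('datatype', DATATYPE_INVALID) in (DATATYPE_WORD, DATATYPE_WORD_BCD):
--             width = 2
--         elif x.get('datatype', DATATYPE_INVALID) in (DATATYPE_STRING, DATATYPE_BYTE_ARRAY):
--             width = x.get('length') + 1
--
--         for i in range(width):
--             known_adresses[addr + i] = True
--
--     known_adresses = [k for k in known_adresses.keys() if known_adresses[k]]
--     unknown_adresses = [u for u in range(SAVE_LENGTH) if u not in known_adresses]
--
--     return unknown_adresses
-- ===== SOURCE B (Python) =====
-- SAVE_LENGTH = 0x550
--
-- DATATYPE_INVALID = -1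
--
-- DATATYPE_WORD = 1
--
-- DATATYPE_WORD_BCD = 3
--
-- DATATYPE_STRING = 4
--
-- DATATYPE_BYTE_ARRAY = 7
--
-- GAMETYPE_AGES = 1,
--
--
-- def subtract(free, a, b):
--     # Remove the half-open interval [a, b) from a list of disjoint, sorted,
--     # non-empty free intervals; pieces of a split interval stay in place.
--     if b <= a:
--         return free
--     result = []
--     for lo, hi in free:
--         if b <= lo or hi <= a:
--             result.append((lo, hi))
--         else:
--             if lo < a:
--                 result.append((lo, a))
--             if b < hi:
--                 result.append((b, hi))
--     return result
--
--
-- def find_unknown_addresses(items, game_type=GAMETYPE_AGES):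
--     # Maintain the COMPLEMENT directly: a sorted list of disjoint free
--     # intervals of [0, SAVE_LENGTH), shrunk by each item's coverage.
--     free = [(0, SAVE_LENGTH)]
--
--     for x in items:
--         if game_type == GAMETYPE_AGES:
--             fallback = x.get('agesaddr', 0x00)
--         else:
--             fallback = x.get('ssnsaddr', 0x00)
--         addr = x.get('addr', fallback)
--
--         dt = x.get('datatype', DATATYPE_INVALID)
--         if dt == DATATYPE_WORD or dt == DATATYPE_WORD_BCD:
--             width = 2
--         elif dt == DATATYPE_STRING or dt == DATATYPE_BYTE_ARRAY:
--             width = x.get('length') + 1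
--         else:
--             width = 1
--
--         free = subtract(free, addr, addr + width)
--
--     unknown_adresses = []
--     for lo, hi in free:
--         unknown_adresses.extend(range(lo, hi))
--     return unknown_adresses
-- ===== Notes on version B (the rewrite author's own statement) =====
-- stated objective: alternative
-- what changed: A marks every covered address in a dict and then tests each of the 1360 save addresses for membership in the list of marked addresses; B never materialises covered addresses at all: it maintains the COMPLEMENT as a sorted list of disjoint free intervals of [0, SAVE_LENGTH), subtracts each item's coverage interval [addr, addr+width) from it, and finally expands the surviving free intervals into addresses.
import Mathlib
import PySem

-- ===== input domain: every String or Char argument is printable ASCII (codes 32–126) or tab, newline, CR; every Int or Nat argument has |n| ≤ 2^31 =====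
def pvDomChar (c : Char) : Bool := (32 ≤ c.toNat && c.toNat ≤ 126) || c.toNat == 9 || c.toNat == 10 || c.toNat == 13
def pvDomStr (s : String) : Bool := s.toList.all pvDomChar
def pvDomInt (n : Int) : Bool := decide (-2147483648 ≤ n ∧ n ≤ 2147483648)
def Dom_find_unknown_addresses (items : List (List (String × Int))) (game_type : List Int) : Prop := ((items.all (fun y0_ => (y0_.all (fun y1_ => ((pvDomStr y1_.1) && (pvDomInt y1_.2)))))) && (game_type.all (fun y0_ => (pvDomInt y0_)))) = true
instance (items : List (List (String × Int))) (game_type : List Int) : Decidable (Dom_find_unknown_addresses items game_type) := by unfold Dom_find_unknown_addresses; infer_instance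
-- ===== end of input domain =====

-- B replaces A's mark-every-covered-address dict plus a per-address membership scan by maintaining the
-- COMPLEMENT: a list of disjoint free intervals shrunk by interval subtraction (objective: alternative).

-- ===== PORT A =====
-- x.get('addr', x.get('agesaddr' if game_type == GAMETYPE_AGES else 'ssnsaddr', 0x00))
def pvAddr (game_type : List Int) (x : List (String × Int)) : Int :=
  (PySem.Dict.ofList x).getD "addr"
    ((PySem.Dict.ofList x).getD (if game_type = [1] then "agesaddr" else "ssnsaddr") 0)

-- width = 1; 2 for WORD/WORD_BCD; length+1 for STRING/BYTE_ARRAY.  When 'length' is missing Python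
-- raises TypeError (None + 1); those inputs are excluded by Pre_, the port's default 0 is never claimed.
def pvWidth (x : List (String × Int)) : Int :=
  if (PySem.Dict.ofList x).getD "datatype" (-1) = 1 ∨ (PySem.Dict.ofList x).getD "datatype" (-1) = 3 then 2
  else if (PySem.Dict.ofList x).getD "datatype" (-1) = 4 ∨ (PySem.Dict.ofList x).getD "datatype" (-1) = 7 then
    (PySem.Dict.ofList x).getD "length" 0 + 1
  else 1

def find_unknown_addresses (items : List (List (String × Int))) (game_type : List Int) : List Int :=
  -- for x in items: for i in range(width): known_adresses[addr + i] = True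
  let known : PySem.Dict Int Bool :=
    items.foldl
      (fun known x =>
        (PySem.List.pyRange 0 (pvWidth x) 1).foldl
          (fun known i => known.insert (pvAddr game_type x + i) true) known)
      PySem.Dict.empty
  -- [k for k in known_adresses.keys() if known_adresses[k]]  (k is a key, so d[k] = getD k false)
  let knownList : List Int := known.keys.filter (fun k => known.getD k false)
  -- [u for u in range(SAVE_LENGTH) if u not in known_adresses]  (SAVE_LENGTH = 0x550 = 1360)
  (PySem.List.pyRange 0 1360 1).filter (fun u => !(knownList.contains u))

-- ===== PORT B =====
-- Source B: the item's coverage interval (addr, addr + width); missing 'length' is excluded by Pre_ (TypeError)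
def altInterval (game_type : List Int) (x : List (String × Int)) : Int × Int :=
  let d := PySem.Dict.ofList x
  let fallback := if game_type = [1] then d.getD "agesaddr" 0 else d.getD "ssnsaddr" 0
  let addr := d.getD "addr" fallback
  let dt := d.getD "datatype" (-1)
  let width : Int :=
    if dt = 1 ∨ dt = 3 then 2
    else if dt = 4 ∨ dt = 7 then d.getD "length" 0 + 1
    else 1
  (addr, addr + width)

-- the loop body of Source B's subtract: per free interval keep it, or keep its pieces outside [a, b)
def altSubLoop : List (Int × Int) → Int → Int → List (Int × Int)
  | [], _, _ => []
  | (lo, hi) :: rest, a, b =>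
      if b ≤ lo ∨ hi ≤ a then (lo, hi) :: altSubLoop rest a b
      else (if lo < a then [(lo, a)] else []) ++ (if b < hi then [(b, hi)] else []) ++ altSubLoop rest a b

-- def subtract(free, a, b): if b <= a: return free; …loop…
def altSubtract (free : List (Int × Int)) (a b : Int) : List (Int × Int) :=
  if b ≤ a then free else altSubLoop free a b

-- for lo, hi in free: unknown_adresses.extend(range(lo, hi))
def altExpand : List (Int × Int) → List Int
  | [] => []
  | (lo, hi) :: rest => PySem.List.pyRange lo hi 1 ++ altExpand rest

def find_unknown_addresses_alt (items : List (List (String × Int))) (game_type : List Int) : List Int :=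
  let free : List (Int × Int) :=
    items.foldl
      (fun free x =>
        let p := altInterval game_type x
        altSubtract free p.1 p.2)
      [(0, 1360)]
  altExpand free

-- ===== PRECONDITION & SPEC =====
-- Pre_ excludes exactly the inputs where Python A raises TypeError: an item of datatype
-- STRING/BYTE_ARRAY without a 'length' key (x.get('length') is None, None + 1 raises).  B raises there too.
def Pre_find_unknown_addresses (items : List (List (String × Int))) (game_type : List Int) : Prop :=
  ∀ x ∈ items,
    ((PySem.Dict.ofList x).getD "datatype" (-1) = 4 ∨ (PySem.Dict.ofList x).getD "datatype" (-1) = 7) →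
      (PySem.Dict.ofList x).contains "length" = true

instance (items : List (List (String × Int))) (game_type : List Int) : Decidable (Pre_find_unknown_addresses items game_type) := by
  unfold Pre_find_unknown_addresses; infer_instance

def pvWitness_find_unknown_addresses : (List (List (String × Int))) × List Int :=
  ([[("addr", 5), ("datatype", 4), ("length", 3)], [("agesaddr", 20)]], [1])

def Spec_find_unknown_addresses (items : List (List (String × Int))) (game_type : List Int) (out : List Int) : Prop := out = find_unknown_addresses_alt items game_type
instance (items : List (List (String × Int))) (game_type : List Int) (out : List Int) : Decidable (Spec_find_unknown_addresses items game_type out) := by unfold Spec_find_unknown_addresses; infer_instance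

-- ===== CLAIM (what is proved, stated in full; the proofs are below) =====
def Claim_equal_find_unknown_addresses : Prop := ∀ (items : List (List (String × Int))) (game_type : List Int), Dom_find_unknown_addresses items game_type → Pre_find_unknown_addresses items game_type → Spec_find_unknown_addresses items game_type (find_unknown_addresses items game_type)

-- ===== LEMMAS AND PROOFS =====

-- covered-by-an-interval test, and the full interval list both programs are about
def pvCov (l : List (Int × Int)) (u : Int) : Bool := l.any (fun p => decide (p.1 ≤ u ∧ u < p.2))

def pvIv (items : List (List (String × Int))) (game_type : List Int) : List (Int × Int) :=
  items.map (fun x => (pvAddr game_type x, pvAddr game_type x + pvWidth x))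

lemma pvCov_cons (p : Int × Int) (l : List (Int × Int)) (u : Int) :
    pvCov (p :: l) u = (decide (p.1 ≤ u ∧ u < p.2) || pvCov l u) := by
  simp [pvCov]

-- ---- A side ----

lemma pvMarkInner (l : List Int) (a : Int) (kn : PySem.Dict Int Bool) (u : Int) :
    u ∈ (l.foldl (fun kn i => kn.insert (a + i) true) kn).keys ↔
      u ∈ kn.keys ∨ ∃ i ∈ l, u = a + i := by
  induction l generalizing kn with
  | nil => simp
  | cons i t ih =>
      simp only [List.foldl_cons, ih, PySem.Dict.mem_keys_insert]
      constructor
      · rintro (h | h)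
        · rcases h with h | h
          · exact Or.inr ⟨i, by simp, h⟩
          · exact Or.inl h
        · rcases h with ⟨j, hj, hu⟩
          exact Or.inr ⟨j, by simp [hj], hu⟩
      · rintro (h | ⟨j, hj, hu⟩)
        · exact Or.inl (Or.inr h)
        · rcases List.mem_cons.mp hj with rfl | hj
          · exact Or.inl (Or.inl hu)
          · exact Or.inr ⟨j, hj, hu⟩

lemma pvMarkKeys (items : List (List (String × Int))) (game_type : List Int)
    (kn : PySem.Dict Int Bool) (u : Int) :
    u ∈ (items.foldl
      (fun known x =>
        (PySem.List.pyRange 0 (pvWidth x) 1).foldl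
          (fun known i => known.insert (pvAddr game_type x + i) true) known)
      kn).keys ↔ u ∈ kn.keys ∨ pvCov (pvIv items game_type) u = true := by
  induction items generalizing kn with
  | nil => simp [pvIv, pvCov]
  | cons x t ih =>
      simp only [List.foldl_cons, ih, pvMarkInner, pvIv, List.map_cons, pvCov_cons]
      have hmem : (∃ i ∈ PySem.List.pyRange 0 (pvWidth x) 1, u = pvAddr game_type x + i) ↔
          (pvAddr game_type x ≤ u ∧ u < pvAddr game_type x + pvWidth x) := by
        constructor
        · rintro ⟨i, hi, rfl⟩
          have := PySem.List.mem_pyRange_one.mp hi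
          omega
        · rintro ⟨h1, h2⟩
          exact ⟨u - pvAddr game_type x, PySem.List.mem_pyRange_one.mpr (by omega), by omega⟩
      rw [hmem]
      simp only [Bool.or_eq_true, decide_eq_true_eq]
      tauto

-- every value stored is `true`, so the comprehension keeps every key
lemma pvValsInsert (kn : PySem.Dict Int Bool) (k0 : Int)
    (h : ∀ k ∈ kn.keys, kn.getD k false = true) :
    ∀ k ∈ (kn.insert k0 true).keys, (kn.insert k0 true).getD k false = true := by
  intro k hk
  rw [PySem.Dict.getD_insert]
  split_ifs with hkk
  · rfl
  · rcases (PySem.Dict.mem_keys_insert _ _ _ _).mp hk with rfl | hk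
    · exact absurd rfl hkk
    · exact h k hk

lemma pvValsInner (l : List Int) (a : Int) (kn : PySem.Dict Int Bool)
    (h : ∀ k ∈ kn.keys, kn.getD k false = true) :
    ∀ k ∈ (l.foldl (fun kn i => kn.insert (a + i) true) kn).keys,
      (l.foldl (fun kn i => kn.insert (a + i) true) kn).getD k false = true := by
  induction l generalizing kn with
  | nil => exact h
  | cons i t ih => exact ih _ (pvValsInsert _ _ h)

lemma pvValsOuter (items : List (List (String × Int))) (game_type : List Int)
    (kn : PySem.Dict Int Bool) (h : ∀ k ∈ kn.keys, kn.getD k false = true) :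
    ∀ k ∈ (items.foldl
      (fun known x =>
        (PySem.List.pyRange 0 (pvWidth x) 1).foldl
          (fun known i => known.insert (pvAddr game_type x + i) true) known)
      kn).keys,
      (items.foldl
        (fun known x =>
          (PySem.List.pyRange 0 (pvWidth x) 1).foldl
            (fun known i => known.insert (pvAddr game_type x + i) true) known)
        kn).getD k false = true := by
  induction items generalizing kn with
  | nil => exact h
  | cons x t ih => exact ih _ (pvValsInner _ _ _ h)

lemma pvContainsEq (items : List (List (String × Int))) (game_type : List Int) (u : Int) :
    ((items.foldl
        (fun known x =>
          (PySem.List.pyRange 0 (pvWidth x) 1).foldl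
            (fun known i => known.insert (pvAddr game_type x + i) true) known)
        PySem.Dict.empty).keys.filter
      (fun k =>
        (items.foldl
          (fun known x =>
            (PySem.List.pyRange 0 (pvWidth x) 1).foldl
              (fun known i => known.insert (pvAddr game_type x + i) true) known)
          PySem.Dict.empty).getD k false)).contains u =
      pvCov (pvIv items game_type) u := by
  rw [List.filter_eq_self.mpr (pvValsOuter items game_type PySem.Dict.empty (by simp))]
  rw [Bool.eq_iff_iff]
  simp only [List.contains_eq_mem, decide_eq_true_eq]
  rw [pvMarkKeys]
  simp [PySem.Dict.keys_empty]

-- ---- B side ----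

-- the invariant of Source B's free list: sorted, pairwise disjoint, non-empty intervals
def pvChain (l : List (Int × Int)) : Prop :=
  l.Pairwise (fun p q => p.2 ≤ q.1) ∧ ∀ p ∈ l, p.1 < p.2

lemma altInterval_eq (game_type : List Int) (x : List (String × Int)) :
    altInterval game_type x = (pvAddr game_type x, pvAddr game_type x + pvWidth x) := by
  by_cases h : game_type = [1] <;> simp [altInterval, pvAddr, pvWidth, h]

lemma pvCov_append (l1 l2 : List (Int × Int)) (u : Int) :
    pvCov (l1 ++ l2) u = (pvCov l1 u || pvCov l2 u) := by
  simp [pvCov]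

lemma pvCov_nil (u : Int) : pvCov [] u = false := rfl

lemma pvSubLoop_cov (free : List (Int × Int)) (a b u : Int) (hab : a < b) :
    pvCov (altSubLoop free a b) u = true ↔ pvCov free u = true ∧ ¬(a ≤ u ∧ u < b) := by
  induction free with
  | nil => simp [altSubLoop, pvCov]
  | cons p rest ih =>
      obtain ⟨lo, hi⟩ := p
      unfold altSubLoop
      split_ifs with h1 h2 h3 h3 <;>
        simp only [pvCov_cons, pvCov_append, pvCov_nil, Bool.or_eq_true, Bool.or_false,
          Bool.false_or, decide_eq_true_eq, ih] <;>
        cases hR : pvCov rest u <;> simp [hR] <;> omega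

lemma pvSubLoop_bounds (free : List (Int × Int)) (a b : Int) :
    ∀ p ∈ altSubLoop free a b, ∃ q ∈ free, q.1 ≤ p.1 ∧ p.2 ≤ q.2 := by
  induction free with
  | nil => intro p hp; simp [altSubLoop] at hp
  | cons q rest ih =>
      obtain ⟨lo, hi⟩ := q
      intro p hp
      have hrec : p ∈ altSubLoop rest a b → ∃ q ∈ (lo, hi) :: rest, q.1 ≤ p.1 ∧ p.2 ≤ q.2 := by
        intro h
        obtain ⟨q', hq', hb⟩ := ih p h
        exact ⟨q', List.mem_cons_of_mem _ hq', hb⟩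
      unfold altSubLoop at hp
      split_ifs at hp with h1 h2 h3 h3 <;>
        simp only [List.mem_append, List.mem_cons, List.not_mem_nil, or_false, false_or,
          List.mem_singleton] at hp
      · rcases hp with rfl | hp
        · exact ⟨(lo, hi), by simp, by simp⟩
        · exact hrec hp
      · rcases hp with (rfl | rfl) | hp
        · exact ⟨(lo, hi), by simp, by constructor <;> simp <;> omega⟩
        · exact ⟨(lo, hi), by simp, by constructor <;> simp <;> omega⟩
        · exact hrec hp
      · rcases hp with rfl | hp
        · exact ⟨(lo, hi), by simp, by constructor <;> simp <;> omega⟩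
        · exact hrec hp
      · rcases hp with rfl | hp
        · exact ⟨(lo, hi), by simp, by constructor <;> simp <;> omega⟩
        · exact hrec hp
      · exact hrec hp


lemma pvSubLoop_chain (free : List (Int × Int)) (a b : Int) (hab : a < b)
    (hc : pvChain free) : pvChain (altSubLoop free a b) := by
  induction free with
  | nil => exact hc
  | cons q rest ih =>
      obtain ⟨lo, hi⟩ := q
      obtain ⟨hpw, hne⟩ := hc
      rw [List.pairwise_cons] at hpw
      have hrest : pvChain rest := ⟨hpw.2, fun p hp => hne p (by simp [hp])⟩
      obtain ⟨ipw, ine⟩ := ih hrest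
      have hafter : ∀ p ∈ altSubLoop rest a b, hi ≤ p.1 := by
        intro p hp
        obtain ⟨q', hq', h⟩ := pvSubLoop_bounds rest a b p hp
        have := hpw.1 q' hq'
        omega
      have hlohi : lo < hi := hne (lo, hi) (by simp)
      unfold altSubLoop
      split_ifs with h1 h2 h3 h3 <;> constructor <;>
        (try simp only [List.singleton_append, List.nil_append])
      · exact List.pairwise_cons.mpr ⟨hafter, ipw⟩
      · intro p hp
        rcases List.mem_cons.mp hp with rfl | hp
        · exact hlohi
        · exact ine p hp
      · refine List.pairwise_cons.mpr ⟨?_, List.pairwise_cons.mpr ⟨?_, ipw⟩⟩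
        · intro p hp
          rcases List.mem_cons.mp hp with rfl | hp
          · simp; omega
          · have := hafter p hp; simp; omega
        · intro p hp
          have := hafter p hp; simp; omega
      · intro p hp
        rcases List.mem_cons.mp hp with rfl | hp
        · simp; omega
        · rcases List.mem_cons.mp hp with rfl | hp
          · simp; omega
          · exact ine p hp
      · refine List.pairwise_cons.mpr ⟨?_, ipw⟩
        intro p hp
        have := hafter p hp; simp; omega
      · intro p hp
        rcases List.mem_cons.mp hp with rfl | hp
        · simp; omega
        · exact ine p hp
      · refine List.pairwise_cons.mpr ⟨?_, ipw⟩
        intro p hp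
        have := hafter p hp; simp; omega
      · intro p hp
        rcases List.mem_cons.mp hp with rfl | hp
        · simp; omega
        · exact ine p hp
      · exact ipw
      · exact ine

lemma pvSubtract_cov (free : List (Int × Int)) (a b u : Int) :
    pvCov (altSubtract free a b) u = true ↔ pvCov free u = true ∧ ¬(a ≤ u ∧ u < b) := by
  unfold altSubtract
  split_ifs with h
  · constructor
    · exact fun hc => ⟨hc, by omega⟩
    · exact fun hc => hc.1
  · exact pvSubLoop_cov free a b u (by omega)

lemma pvSubtract_chain (free : List (Int × Int)) (a b : Int) (hc : pvChain free) :
    pvChain (altSubtract free a b) := by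
  unfold altSubtract
  split_ifs with h
  · exact hc
  · exact pvSubLoop_chain free a b (by omega) hc

-- membership in the expansion IS interval coverage
lemma pvMemExpand (l : List (Int × Int)) (u : Int) :
    u ∈ altExpand l ↔ pvCov l u = true := by
  induction l with
  | nil => simp [altExpand, pvCov]
  | cons p rest ih =>
      obtain ⟨lo, hi⟩ := p
      simp [altExpand, pvCov_cons, ih, PySem.List.mem_pyRange_one]

lemma pvExpand_pairwise (l : List (Int × Int)) (hc : pvChain l) :
    (altExpand l).Pairwise (· < ·) := by
  induction l with
  | nil => simp [altExpand]
  | cons p rest ih =>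
      obtain ⟨lo, hi⟩ := p
      obtain ⟨hpw, hne⟩ := hc
      rw [List.pairwise_cons] at hpw
      have hrest := ih ⟨hpw.2, fun q hq => hne q (by simp [hq])⟩
      unfold altExpand
      rw [List.pairwise_append]
      refine ⟨PySem.List.pairwise_lt_pyRange_one _ _, hrest, ?_⟩
      intro u hu v hv
      have hu' := (PySem.List.mem_pyRange_one.mp hu).2
      obtain ⟨q, hq, hcond⟩ := List.any_eq_true.mp ((pvMemExpand rest v).mp hv)
      have hcond' := of_decide_eq_true hcond
      have := hpw.1 q hq
      omega

-- two strictly increasing lists with the same members are equal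
lemma pvSortedExt : ∀ (l1 l2 : List Int), l1.Pairwise (· < ·) → l2.Pairwise (· < ·) →
    (∀ u, u ∈ l1 ↔ u ∈ l2) → l1 = l2 := by
  intro l1
  induction l1 with
  | nil =>
      intro l2 _ _ hm
      cases l2 with
      | nil => rfl
      | cons b t => exact absurd ((hm b).mpr (by simp)) (by simp)
  | cons a t1 ih =>
      intro l2 h1 h2 hm
      cases l2 with
      | nil => exact absurd ((hm a).mp (by simp)) (by simp)
      | cons b t2 =>
          have hab : a = b := by
            have ha : a = b ∨ a ∈ t2 := by simpa using (hm a).mp (by simp)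
            have hb : b = a ∨ b ∈ t1 := by simpa using (hm b).mpr (by simp)
            rcases ha with h | ha
            · exact h
            · rcases hb with h | hb
              · exact h.symm
              · have h1' := (List.pairwise_cons.mp h1).1 b hb
                have h2' := (List.pairwise_cons.mp h2).1 a ha
                omega
          subst hab
          have ht : t1 = t2 := by
            apply ih t2 (List.pairwise_cons.mp h1).2 (List.pairwise_cons.mp h2).2
            intro u
            constructor
            · intro hu
              have := (hm u).mp (by simp [hu])
              rcases List.mem_cons.mp this with rfl | h
              · exact absurd ((List.pairwise_cons.mp h1).1 u hu) (by omega)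
              · exact h
            · intro hu
              have := (hm u).mpr (by simp [hu])
              rcases List.mem_cons.mp this with rfl | h
              · exact absurd ((List.pairwise_cons.mp h2).1 u hu) (by omega)
              · exact h
          rw [ht]

-- the fold of Source B: coverage of the final free list, plus its chain invariant
lemma pvFoldFree (items : List (List (String × Int))) (game_type : List Int)
    (acc : List (Int × Int)) (hc : pvChain acc) :
    pvChain (items.foldl
        (fun free x => altSubtract free (altInterval game_type x).1 (altInterval game_type x).2) acc) ∧
      ∀ u, pvCov (items.foldl
        (fun free x => altSubtract free (altInterval game_type x).1 (altInterval game_type x).2) acc) u = true ↔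
        (pvCov acc u = true ∧ ¬ pvCov (pvIv items game_type) u = true) := by
  induction items generalizing acc with
  | nil => exact ⟨hc, fun u => by simp [pvIv, pvCov]⟩
  | cons x t ih =>
      obtain ⟨hch, hcov⟩ := ih (altSubtract acc (altInterval game_type x).1 (altInterval game_type x).2)
        (pvSubtract_chain _ _ _ hc)
      refine ⟨hch, fun u => ?_⟩
      rw [List.foldl_cons] at *
      rw [hcov u, pvSubtract_cov, altInterval_eq]
      simp only [pvIv, List.map_cons, pvCov_cons, Bool.or_eq_true, decide_eq_true_eq]
      tauto

-- ===== VERDICT (by name: the statement is the Claim_ definition above) =====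
theorem find_unknown_addresses_spec : Claim_equal_find_unknown_addresses := by
  intro items game_type _ _
  unfold Spec_find_unknown_addresses find_unknown_addresses find_unknown_addresses_alt
  simp only []
  obtain ⟨hch, hcov⟩ := pvFoldFree items game_type [(0, 1360)]
    ⟨by simp, by intro p hp; simp at hp; subst hp; norm_num⟩
  apply pvSortedExt
  · exact List.Pairwise.filter _ (PySem.List.pairwise_lt_pyRange_one _ _)
  · exact pvExpand_pairwise _ hch
  · intro u
    rw [pvMemExpand, hcov u]
    simp only [List.mem_filter, PySem.List.mem_pyRange_one, pvContainsEq, Bool.not_eq_true',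
      pvCov_cons, pvCov_nil, Bool.or_false, decide_eq_true_eq]
    constructor
    · rintro ⟨h1, h2⟩
      exact ⟨h1, by cases h : pvCov (pvIv items game_type) u <;> simp_all⟩
    · rintro ⟨h1, h2⟩
      exact ⟨h1, by simp [h2]⟩
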